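-- pv_equiv track=rewrite | github.com/brownkp/europatch | patch_generator.py | _find_relevant_modules
-- ===== SOURCE A (Python) =====
-- def _find_relevant_modules(modules, patch_type):
--     """
--     Find modules relevant to the patch type
--
--     Args:
--         modules (list): Available modules
--         patch_type (str): Patch type
--
--     Returns:
--         list: Sorted modules by relevance
--     """
--     # Group modules by type
--     module_types = {}
--     for module in modules:
--         module_type = module.get('module_type', 'Other')
--         if module_type not in module_types:
--             module_types[module_type] = []
--         module_types[module_type].append(module)
--
--     # Return all modules, but sorted by relevance to patch type
--     sorted_modules = []
--
--     # Define priority module types for each patch type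
--     priority_types = {
--         'ambient': ['VCO', 'Effect', 'LFO', 'VCA', 'VCF'],
--         'generative': ['Sequencer', 'LFO', 'VCO', 'Effect', 'VCF'],
--         'percussion': ['VCO', 'Envelope', 'VCA', 'Effect'],
--         'bass': ['VCO', 'VCF', 'VCA', 'Envelope'],
--         'lead': ['VCO', 'VCF', 'Envelope', 'Effect'],
--         'drone': ['VCO', 'Effect', 'VCF', 'LFO'],
--         'techno': ['Sequencer', 'VCO', 'VCF', 'Envelope', 'Effect']
--     }
--
--     # Get priority types for the current patch type
--     current_priorities = priority_types.get(patch_type, ['VCO', 'VCF', 'VCA', 'Effect'])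
--
--     # Add modules in priority order
--     for priority_type in current_priorities:
--         if priority_type in module_types:
--             sorted_modules.extend(module_types[priority_type])
--
--     # Add remaining modules
--     for module_type, module_list in module_types.items():
--         if module_type not in current_priorities:
--             sorted_modules.extend(module_list)
--
--     return sorted_modules
-- ===== SOURCE B (Python) =====
-- def _find_relevant_modules(modules, patch_type):
--     """Same result as A: priority types first (in priority order), then the
--     remaining types grouped in first-appearance order, original order within
--     each type — computed with repeated filters instead of a grouping dict."""
--     priority_types = {
--         'ambient': ['VCO', 'Effect', 'LFO', 'VCA', 'VCF'],
--         'generative': ['Sequencer', 'LFO', 'VCO', 'Effect', 'VCF'],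
--         'percussion': ['VCO', 'Envelope', 'VCA', 'Effect'],
--         'bass': ['VCO', 'VCF', 'VCA', 'Envelope'],
--         'lead': ['VCO', 'VCF', 'Envelope', 'Effect'],
--         'drone': ['VCO', 'Effect', 'VCF', 'LFO'],
--         'techno': ['Sequencer', 'VCO', 'VCF', 'Envelope', 'Effect']
--     }
--     current = priority_types.get(patch_type, ['VCO', 'VCF', 'VCA', 'Effect'])
--     # non-priority types, in first-appearance order
--     others = []
--     for m in modules:
--         t = m.get('module_type', 'Other')
--         if t not in current and t not in others:
--             others.append(t)
--     return [m for t in current + others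
--               for m in modules if m.get('module_type', 'Other') == t]
-- ===== Notes on version B (the rewrite author's own statement) =====
-- stated objective: simpler
-- what changed: B drops A's grouping dict and two extend-loops entirely: it collects the non-priority types in first-appearance order in one pass, then builds the result as one comprehension that filters the module list once per type in (priority ++ others) order.
import Mathlib
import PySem

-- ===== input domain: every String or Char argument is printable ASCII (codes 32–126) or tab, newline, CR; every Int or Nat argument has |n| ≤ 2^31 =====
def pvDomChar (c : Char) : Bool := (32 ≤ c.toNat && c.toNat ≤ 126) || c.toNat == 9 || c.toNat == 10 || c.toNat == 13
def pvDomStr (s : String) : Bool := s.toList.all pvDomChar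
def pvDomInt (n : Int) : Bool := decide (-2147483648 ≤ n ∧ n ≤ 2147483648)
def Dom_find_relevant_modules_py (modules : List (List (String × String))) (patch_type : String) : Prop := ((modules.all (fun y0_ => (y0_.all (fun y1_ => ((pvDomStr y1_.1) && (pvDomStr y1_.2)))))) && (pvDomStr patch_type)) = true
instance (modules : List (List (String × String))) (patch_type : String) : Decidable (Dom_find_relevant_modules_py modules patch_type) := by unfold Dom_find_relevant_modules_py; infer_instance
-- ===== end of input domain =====

-- B replaces A's grouping dict + two extend-loops with a one-pass list of the
-- non-priority types and a single per-type filter comprehension (objective: simpler).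

-- module.get('module_type', 'Other')  (shared accessor; identical in both Pythons)
def pvGetType (m : List (String × String)) : String :=
  (PySem.Dict.mk m).getD "module_type" "Other"

-- the priority_types table and its .get(patch_type, default)  (identical literal in both Pythons)
def pvCurrentPriorities (patch_type : String) : List String :=
  (PySem.Dict.ofList [
    ("ambient", ["VCO", "Effect", "LFO", "VCA", "VCF"]),
    ("generative", ["Sequencer", "LFO", "VCO", "Effect", "VCF"]),
    ("percussion", ["VCO", "Envelope", "VCA", "Effect"]),
    ("bass", ["VCO", "VCF", "VCA", "Envelope"]),
    ("lead", ["VCO", "VCF", "Envelope", "Effect"]),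
    ("drone", ["VCO", "Effect", "VCF", "LFO"]),
    ("techno", ["Sequencer", "VCO", "VCF", "Envelope", "Effect"])
  ]).getD patch_type ["VCO", "VCF", "VCA", "Effect"]

-- ===== PORT A =====
-- 'if t not in d: d[t] = []; d[t].append(m)' is exactly Dict.modify t [] (· ++ [m])
def find_relevant_modules_py (modules : List (List (String × String))) (patch_type : String) : List (List (String × String)) :=
  let module_types := modules.foldl
    (fun d m => d.modify (pvGetType m) [] (fun l => l ++ [m])) PySem.Dict.empty
  let current := pvCurrentPriorities patch_type
  let sorted1 := current.foldl
    (fun acc p => if module_types.contains p then acc ++ module_types.getD p [] else acc) []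
  module_types.items.foldl
    (fun acc tl => if tl.1 ∉ current then acc ++ tl.2 else acc) sorted1

-- ===== PORT B =====
def find_relevant_modules_py_alt (modules : List (List (String × String))) (patch_type : String) : List (List (String × String)) :=
  let current := pvCurrentPriorities patch_type
  let others := modules.foldl
    (fun s m => let t := pvGetType m; if t ∉ current ∧ t ∉ s then s ++ [t] else s) []
  (current ++ others).foldl
    (fun acc t => acc ++ modules.filter (fun m => pvGetType m == t)) []

-- ===== PRECONDITION & SPEC =====
def Spec_find_relevant_modules_py (modules : List (List (String × String))) (patch_type : String) (out : List (List (String × String))) : Prop := out = find_relevant_modules_py_alt modules patch_type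
instance (modules : List (List (String × String))) (patch_type : String) (out : List (List (String × String))) : Decidable (Spec_find_relevant_modules_py modules patch_type out) := by unfold Spec_find_relevant_modules_py; infer_instance

-- ===== CLAIM (what is proved, stated in full; the proofs are below) =====
def Claim_equal_find_relevant_modules_py : Prop := ∀ (modules : List (List (String × String))) (patch_type : String), Dom_find_relevant_modules_py modules patch_type → Spec_find_relevant_modules_py modules patch_type (find_relevant_modules_py modules patch_type)

-- ===== LEMMAS AND PROOFS =====

-- the grouping dict's entry for t is exactly the filter of modules by type t
theorem pv_groupD (modules : List (List (String × String))) (t : String) :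
    (modules.foldl (fun d m => d.modify (pvGetType m) [] (fun l => l ++ [m])) PySem.Dict.empty).getD t []
      = modules.filter (fun m => pvGetType m == t) := by
  have h : modules.foldl (fun d m => d.modify (pvGetType m) [] (fun l => l ++ [m])) PySem.Dict.empty
      = (modules.map (fun m => (pvGetType m, m))).foldl (fun d p => d.modify p.1 [] (fun l => l ++ [p.2])) PySem.Dict.empty := by
    rw [List.foldl_map]
  rw [h, PySem.Dict.getD_foldl_modify_append, PySem.Dict.getD_empty, List.filter_map, List.map_map]
  simp [Function.comp_def]

-- the grouping dict's keys are the distinct types in first-appearance order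
theorem pv_groupKeys (modules : List (List (String × String))) :
    (modules.foldl (fun d m => d.modify (pvGetType m) [] (fun l => l ++ [m])) PySem.Dict.empty).keys
      = PySem.Set.ofList (modules.map pvGetType) := by
  rw [PySem.Dict.keys_foldl_modify_key]
  simp [PySem.Set.update, PySem.Set.ofList, PySem.Dict.keys_empty]

-- B's one-pass 'others' loop is the Set-dedup of the non-priority types
theorem pv_seen (C : List String) (ts : List String) (s : List String) :
    ts.foldl (fun s t => if t ∉ C ∧ t ∉ s then s ++ [t] else s) s
      = PySem.Set.update s (ts.filter (fun t => !decide (t ∈ C))) := by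
  induction ts generalizing s with
  | nil => simp [PySem.Set.update]
  | cons x ts ih =>
    by_cases hc : x ∈ C
    · simp [hc, ih, PySem.Set.update]
    · by_cases hs : x ∈ s <;>
        simp [hc, hs, ih, PySem.Set.update, PySem.Set.add, PySem.Set.contains]

theorem pv_filter_add (p : String → Bool) (s : List String) (x : String) :
    (PySem.Set.add s x).filter p = if p x then PySem.Set.add (s.filter p) x else s.filter p := by
  by_cases hp : p x <;> by_cases hs : x ∈ s <;>
    simp [PySem.Set.add, PySem.Set.contains, hp, hs, List.mem_filter]

-- filtering a deduped list = deduping the filtered list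
theorem pv_filter_update (p : String → Bool) (ts : List String) : ∀ s,
    (PySem.Set.update s ts).filter p = PySem.Set.update (s.filter p) (ts.filter p) := by
  induction ts with
  | nil => intro s; simp [PySem.Set.update]
  | cons x ts ih =>
    intro s
    show (PySem.Set.update (PySem.Set.add s x) ts).filter p = _
    rw [ih, pv_filter_add, List.filter_cons]
    by_cases hp : p x <;> simp [hp, PySem.Set.update]

-- A's guarded extend-loop is one flatMap over the kept keys
theorem pv_foldl_ite_extend (C : List String) (g : String → List (List (String × String)))
    (l : List String) : ∀ (acc : List (List (String × String))),
    l.foldl (fun acc k => if k ∉ C then acc ++ g k else acc) acc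
      = acc ++ (l.filter (fun k => !decide (k ∈ C))).flatMap g := by
  induction l with
  | nil => simp
  | cons x l ih =>
    intro acc
    rw [List.foldl_cons, List.filter_cons]
    by_cases hc : x ∈ C
    · simp only [hc, not_true_eq_false, if_false, decide_true, Bool.not_true]
      exact ih acc
    · simp only [hc, not_false_eq_true, if_true, decide_false, Bool.not_false]
      rw [ih]; simp

-- B's loop over modules equals the seen-loop over the type list
theorem pv_seen_modules (C : List String) (modules : List (List (String × String))) :
    modules.foldl (fun s m => if pvGetType m ∉ C ∧ pvGetType m ∉ s then s ++ [pvGetType m] else s) []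
      = PySem.Set.update [] ((modules.map pvGetType).filter (fun t => !decide (t ∈ C))) := by
  have h := pv_seen C (modules.map pvGetType) []
  rw [List.foldl_map] at h
  exact h

-- ===== VERDICT (by name: the statement is the Claim_ definition above) =====
theorem find_relevant_modules_py_spec : Claim_equal_find_relevant_modules_py := by
  intro modules patch_type _
  show find_relevant_modules_py modules patch_type = find_relevant_modules_py_alt modules patch_type
  simp only [find_relevant_modules_py, find_relevant_modules_py_alt]
  set C := pvCurrentPriorities patch_type with hC
  set filt : String → List (List (String × String)) :=
    fun t => modules.filter (fun m => pvGetType m == t) with hfilt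
  set D := modules.foldl (fun d m => d.modify (pvGetType m) [] (fun l => l ++ [m])) PySem.Dict.empty with hDdef
  have hD : ∀ t, D.getD t [] = filt t := fun t => pv_groupD modules t
  have hK : D.keys = PySem.Set.ofList (modules.map pvGetType) := pv_groupKeys modules
  have hnd : D.keys.Nodup := by
    rw [hDdef]
    exact PySem.Dict.nodup_keys_foldl_modify_key modules pvGetType [] (fun _ m => fun l => l ++ [m])
      PySem.Dict.empty PySem.Dict.nodup_keys_empty
  -- A's first loop: drop the contains-guard (the group is empty exactly when the guard fails)
  have h1 : ∀ (acc : List (List (String × String))), ∀ p ∈ C,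
      (if D.contains p then acc ++ D.getD p [] else acc) = acc ++ filt p := by
    intro acc p _
    by_cases hc : D.contains p = true
    · rw [if_pos hc, hD]
    · rw [if_neg (by simp [hc])]
      have hpk : p ∉ D.keys := fun hm => hc ((PySem.Dict.contains_iff_mem_keys D p).mpr hm)
      rw [hK] at hpk
      have hfe : filt p = [] := by
        rw [hfilt]
        simp only [List.filter_eq_nil_iff]
        intro m hm hb
        have hq : pvGetType m = p := by simpa using hb
        exact hpk ((PySem.Set.mem_ofList (modules.map pvGetType) p).mpr
          (List.mem_map.mpr ⟨m, hm, hq⟩))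
      rw [hfe, List.append_nil]
  rw [PySem.List.foldl_congr_mem C _ (fun acc p => acc ++ filt p) [] h1,
      PySem.List.foldl_append_eq_flatMap, List.nil_append]
  -- A's second loop: items = keys paired with their groups, then one flatMap
  rw [PySem.Dict.items_eq_map_keys D hnd [], List.foldl_map]
  have h2 : ∀ (acc : List (List (String × String))), ∀ k ∈ D.keys,
      (fun acc k => if ((k, D.getD k []) : String × List (List (String × String))).1 ∉ C then
          acc ++ ((k, D.getD k []) : String × List (List (String × String))).2 else acc) acc k
        = (fun acc k => if k ∉ C then acc ++ filt k else acc) acc k := by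
    intro acc k _
    simp only [hD]
  rw [PySem.List.foldl_congr_mem D.keys _ _ _ h2, pv_foldl_ite_extend, hK]
  -- B's side: the two appended flatMaps, with 'others' as a deduped filtered type list
  rw [pv_seen_modules, List.foldl_append, PySem.List.foldl_append_eq_flatMap,
      PySem.List.foldl_append_eq_flatMap, List.nil_append]
  -- both 'other' halves enumerate the same types
  have hof : PySem.Set.ofList (modules.map pvGetType)
      = PySem.Set.update [] (modules.map pvGetType) := rfl
  rw [hof, pv_filter_update]
  simp [hfilt]
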